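-- pv_equiv track=rewrite | github.com/udaynmenon/advent-of-code | 2025/day-04/forklift.py | get_accessible_rolls
-- ===== SOURCE A (Python) =====
-- from typing import List, Tuple, Final
--
-- VAL_PAPER: Final[int] = 1
--
-- ADJACENT_DELTAS: Final[List[Tuple[int, int]]] = [
--     (-1, -1),
--     (-1, 0),
--     (-1, 1),
--     (0, -1),
--     (0, 1),
--     (1, -1),
--     (1, 0),
--     (1, 1),
-- ]
--
-- Grid = List[List[int]]
--
-- def is_acessible(grid: Grid, i: int, j: int) -> bool:
--     """
--     Returns True if more than 3 adjacent cells have value 1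
--     """
--     r = len(grid)
--     c = len(grid[0])
--
--     neighbours = 0
--
--     for dr, dc in ADJACENT_DELTAS:
--         nr, nc = i + dr, j + dc
--
--         # Check Bounds
--         if 0 <= nr < r and 0 <= nc < c:
--             if grid[nr][nc] == VAL_PAPER:
--                 neighbours += 1
--
--             if neighbours > 3:
--                 return True
--
--     return False
--
-- def get_accessible_rolls(grid: Grid) -> List[Tuple[int, int]]:
--     """
--     Identifies and returns all paper rolls that are currently accessible.
--     """
--     rows, cols = len(grid), len(grid[0])
--
--     accessible_rolls = list()
--
--     for r in range(rows):
--         for c in range(cols):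
--             if grid[r][c] == VAL_PAPER:
--                 if not is_acessible(grid, r, c):
--                     accessible_rolls.append((r, c))
--
--     return accessible_rolls
-- ===== SOURCE B (Python) =====
-- def get_accessible_rolls(grid):
--     """
--     Scatter pass: every paper cell adds +1 to each in-bounds neighbour's
--     count in a dict; then one row-major collection pass keeps the paper
--     cells whose accumulated neighbour count is <= 3.
--     """
--     rows, cols = len(grid), len(grid[0])
--     deltas = [(-1, -1), (-1, 0), (-1, 1), (0, -1), (0, 1), (1, -1), (1, 0), (1, 1)]
--     targets = [(r + dr, c + dc)
--                for r in range(rows) for c in range(cols)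
--                if grid[r][c] == 1
--                for dr, dc in deltas
--                if 0 <= r + dr < rows and 0 <= c + dc < cols]
--     counts = {}
--     for t in targets:
--         counts[t] = counts.get(t, 0) + 1
--     return [(r, c) for r in range(rows) for c in range(cols)
--             if grid[r][c] == 1 and counts.get((r, c), 0) <= 3]
-- ===== Notes on version B (the rewrite author's own statement) =====
-- stated objective: alternative
-- what changed: A gathers: for each paper cell it re-scans its 8 neighbours with an early exit; B scatters: one pass over the grid adds +1 into a dict for every in-bounds neighbour of each paper cell, then a second row-major pass collects the paper cells whose accumulated count is <= 3.
import Mathlib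
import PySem

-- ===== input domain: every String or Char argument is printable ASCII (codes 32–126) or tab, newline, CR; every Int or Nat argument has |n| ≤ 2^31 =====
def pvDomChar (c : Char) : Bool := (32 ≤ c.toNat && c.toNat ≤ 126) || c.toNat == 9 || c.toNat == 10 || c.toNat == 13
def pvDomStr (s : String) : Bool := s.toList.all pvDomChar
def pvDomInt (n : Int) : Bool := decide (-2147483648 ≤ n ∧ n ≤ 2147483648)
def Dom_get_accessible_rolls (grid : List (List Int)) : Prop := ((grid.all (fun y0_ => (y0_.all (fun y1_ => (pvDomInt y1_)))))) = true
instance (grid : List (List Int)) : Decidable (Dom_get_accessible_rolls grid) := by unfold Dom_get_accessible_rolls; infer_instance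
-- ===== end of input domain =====

-- ONE LINE: B replaces A's per-cell gather (8-neighbour scan with early exit) by a scatter
-- pass into a dict counter followed by a row-major collection pass; same cost, different algorithm.

-- ===== PORT A =====
def pvDeltas : List (Int × Int) :=
  [(-1,-1),(-1,0),(-1,1),(0,-1),(0,1),(1,-1),(1,0),(1,1)]

-- the neighbour loop of is_acessible, with its early return at neighbours > 3
def isAcessibleGo (grid : List (List Int)) (r c i j : Int) :
    List (Int × Int) → Int → Bool
  | [], _ => false
  | (dr,dc) :: rest, n =>
    let nr := i + dr
    let nc := j + dc
    if 0 ≤ nr ∧ nr < r ∧ 0 ≤ nc ∧ nc < c then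
      let n' := if PySem.List.pyGetD (PySem.List.pyGetD grid nr []) nc 0 = 1 then n + 1 else n
      if n' > 3 then true else isAcessibleGo grid r c i j rest n'
    else isAcessibleGo grid r c i j rest n

def is_acessible (grid : List (List Int)) (i j : Int) : Bool :=
  isAcessibleGo grid (grid.length : Int) (((grid.headD []).length : Nat) : Int) i j pvDeltas 0

def get_accessible_rolls (grid : List (List Int)) : List (Int × Int) :=
  let rows : Int := grid.length
  let cols : Int := (grid.headD []).length
  (PySem.List.pyRange 0 rows 1).foldl (fun acc r =>
    (PySem.List.pyRange 0 cols 1).foldl (fun acc c =>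
      if PySem.List.pyGetD (PySem.List.pyGetD grid r []) c 0 = 1 then
        if ¬ is_acessible grid r c then acc ++ [(r, c)] else acc
      else acc) acc) []

-- ===== PORT B =====
def pvDeltasB : List (Int × Int) :=
  [(-1,-1),(-1,0),(-1,1),(0,-1),(0,1),(1,-1),(1,0),(1,1)]

-- the `targets` comprehension of Source B: one in-bounds target per (paper cell, delta) pair
def pvTargets (grid : List (List Int)) (rows cols : Int) : List (Int × Int) :=
  (PySem.List.pyRange 0 rows 1).flatMap (fun r =>
    (PySem.List.pyRange 0 cols 1).flatMap (fun c =>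
      if PySem.List.pyGetD (PySem.List.pyGetD grid r []) c 0 = 1 then
        (pvDeltasB.filter (fun d =>
            decide (0 ≤ r + d.1 ∧ r + d.1 < rows ∧ 0 ≤ c + d.2 ∧ c + d.2 < cols))).map
          (fun d => (r + d.1, c + d.2))
      else []))

def get_accessible_rolls_alt (grid : List (List Int)) : List (Int × Int) :=
  let rows : Int := grid.length
  let cols : Int := (grid.headD []).length
  let counts : PySem.Dict (Int × Int) Int :=
    (pvTargets grid rows cols).foldl (fun d t => d.insert t (d.getD t 0 + 1)) PySem.Dict.empty
  (PySem.List.pyRange 0 rows 1).flatMap (fun r =>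
    ((PySem.List.pyRange 0 cols 1).filter (fun c =>
        PySem.List.pyGetD (PySem.List.pyGetD grid r []) c 0 == 1 &&
        counts.getD (r, c) 0 ≤ 3)).map (fun c => (r, c)))

-- ===== PRECONDITION & SPEC =====
-- Pre_ excludes exactly the inputs on which the Python A raises IndexError:
-- the empty grid (len(grid[0])) and grids with a row shorter than row 0 (grid[r][c]).
def Pre_get_accessible_rolls (grid : List (List Int)) : Prop :=
  grid ≠ [] ∧ ∀ row ∈ grid, (grid.headD []).length ≤ row.length
instance (grid : List (List Int)) : Decidable (Pre_get_accessible_rolls grid) := by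
  unfold Pre_get_accessible_rolls; infer_instance

def pvWitness_get_accessible_rolls : List (List Int) := [[1, 1], [1, 1]]

def Spec_get_accessible_rolls (grid : List (List Int)) (out : List (Int × Int)) : Prop :=
  out = get_accessible_rolls_alt grid
instance (grid : List (List Int)) (out : List (Int × Int)) : Decidable (Spec_get_accessible_rolls grid out) := by
  unfold Spec_get_accessible_rolls; infer_instance

-- ===== CLAIM (what is proved, stated in full; the proofs are below) =====
def Claim_equal_get_accessible_rolls : Prop :=
  ∀ (grid : List (List Int)), Dom_get_accessible_rolls grid →
    Pre_get_accessible_rolls grid →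
    Spec_get_accessible_rolls grid (get_accessible_rolls grid)

-- ===== LEMMAS AND PROOFS =====

-- generic helpers
theorem pvSumSwap {α β : Type} (l : List α) (m : List β) (f : α → β → Nat) :
    (l.map (fun x => (m.map (f x)).sum)).sum = (m.map (fun y => (l.map (fun x => f x y)).sum)).sum := by
  induction l with
  | nil => simp
  | cons x l ih => simp [ih, ← List.sum_map_add]

theorem pvSumCollapse (l : List Int) (hl : l.Nodup) (a : Int) (f : Int → Nat) :
    (l.map (fun x => if x = a then f x else 0)).sum = if a ∈ l then f a else 0 := by
  induction l with
  | nil => simp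
  | cons x l ih =>
    simp only [List.nodup_cons] at hl
    simp only [List.map_cons, List.sum_cons, ih hl.2, List.mem_cons]
    by_cases hx : x = a
    · subst hx; simp [hl.1]
    · simp [hx, Ne.symm hx]

-- Nat-valued 0/1-sum form of countP (PySem.List.sum_map_ite_one_zero is the Int-valued one)
theorem pvCountP_eq_sum {α : Type} (l : List α) (q : α → Bool) :
    l.countP q = (l.map (fun x => if q x then 1 else 0)).sum := by
  induction l with
  | nil => simp
  | cons x l ih =>
    by_cases h : q x
    · simp [h, ih]; omega
    · simp [h, ih]

def nbCnt (grid : List (List Int)) (R C i j : Int) : Nat :=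
  pvDeltas.countP (fun d =>
    decide (0 ≤ i + d.1 ∧ i + d.1 < R ∧ 0 ≤ j + d.2 ∧ j + d.2 < C) &&
    decide (PySem.List.pyGetD (PySem.List.pyGetD grid (i + d.1) []) (j + d.2) 0 = 1))

theorem targets_count (grid : List (List Int)) (R C i j : Int)
    (hi0 : 0 ≤ i) (hiR : i < R) (hj0 : 0 ≤ j) (hjC : j < C) :
    (pvTargets grid R C).count (i, j) = nbCnt grid R C i j := by
  -- step 1: count over the two flatMaps as a double sum
  rw [pvTargets, List.count_eq_countP, List.countP_flatMap]
  simp only [Function.comp_def, List.countP_flatMap]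
  -- step 2: per cell, the inner countP is a 0/1 sum over the deltas
  have step2 : ∀ r c : Int,
      List.countP (fun x => x == (i, j))
        (if PySem.List.pyGetD (PySem.List.pyGetD grid r []) c 0 = 1 then
          List.map (fun d => (r + d.1, c + d.2))
            (List.filter (fun d => decide (0 ≤ r + d.1 ∧ r + d.1 < R ∧ 0 ≤ c + d.2 ∧ c + d.2 < C))
              pvDeltasB)
        else [])
      = (pvDeltasB.map (fun d => if c = j - d.2 then
            (if r = i - d.1 then
              (if (0 ≤ r + d.1 ∧ r + d.1 < R ∧ 0 ≤ c + d.2 ∧ c + d.2 < C) ∧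
                  PySem.List.pyGetD (PySem.List.pyGetD grid r []) c 0 = 1 then 1 else 0)
            else 0) else 0)).sum := by
    intro r c
    by_cases hp : PySem.List.pyGetD (PySem.List.pyGetD grid r []) c 0 = 1
    · simp only [if_pos hp, List.countP_map, List.countP_filter, Function.comp_def]
      rw [pvCountP_eq_sum]
      congr 1
      apply List.map_congr_left
      intro d hd
      by_cases hc : c = j - d.2
      · by_cases hr : r = i - d.1
        · by_cases hB : 0 ≤ r + d.1 ∧ r + d.1 < R ∧ 0 ≤ c + d.2 ∧ c + d.2 < C
          · simp only [if_pos hc, if_pos hr, if_pos (And.intro hB hp)]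
            have : ((r + d.1, c + d.2) == (i, j)) = true := by
              simp [Prod.ext_iff]; omega
            simp [this, hB]
          · simp only [if_pos hc, if_pos hr, if_neg (fun h : _ ∧ _ => hB h.1)]
            simp [hB]
        · simp only [if_pos hc, if_neg hr]
          have : ((r + d.1, c + d.2) == (i, j)) = false := by
            simp [Prod.ext_iff]; omega
          simp [this]
      · simp only [if_neg hc]
        have : ((r + d.1, c + d.2) == (i, j)) = false := by
          simp [Prod.ext_iff]; omega
        simp [this]
    · simp only [if_neg hp, List.countP_nil]
      have : ∀ d ∈ pvDeltasB, (if c = j - d.2 then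
            (if r = i - d.1 then
              (if (0 ≤ r + d.1 ∧ r + d.1 < R ∧ 0 ≤ c + d.2 ∧ c + d.2 < C) ∧
                  PySem.List.pyGetD (PySem.List.pyGetD grid r []) c 0 = 1 then 1 else 0)
            else 0) else 0) = 0 := by
        intro d hd
        split_ifs with h1 h2 h3
        · exact absurd h3.2 hp
        · rfl
        · rfl
        · rfl
      rw [List.map_congr_left this]
      simp
  simp only [step2]
  -- step 3: swap the sums to bring the delta sum outside
  rw [List.map_congr_left (fun r _ => pvSumSwap (PySem.List.pyRange 0 C 1) pvDeltasB _)]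
  rw [pvSumSwap (PySem.List.pyRange 0 R 1) pvDeltasB _]
  -- step 4: for each delta, the double range sum collapses to a single indicator
  have step4 : ∀ d ∈ pvDeltasB,
      ((PySem.List.pyRange 0 R 1).map (fun r =>
        ((PySem.List.pyRange 0 C 1).map (fun c =>
          if c = j - d.2 then
            if r = i - d.1 then
              if (0 ≤ r + d.1 ∧ r + d.1 < R ∧ 0 ≤ c + d.2 ∧ c + d.2 < C) ∧
                  PySem.List.pyGetD (PySem.List.pyGetD grid r []) c 0 = 1 then 1 else 0
            else 0
          else 0)).sum)).sum
      = if (0 ≤ i - d.1 ∧ i - d.1 < R ∧ 0 ≤ j - d.2 ∧ j - d.2 < C) ∧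
            PySem.List.pyGetD (PySem.List.pyGetD grid (i - d.1) []) (j - d.2) 0 = 1 then 1 else 0 := by
    intro d _
    have hc : ∀ r : Int,
        ((PySem.List.pyRange 0 C 1).map (fun c =>
          if c = j - d.2 then
            if r = i - d.1 then
              if (0 ≤ r + d.1 ∧ r + d.1 < R ∧ 0 ≤ c + d.2 ∧ c + d.2 < C) ∧
                  PySem.List.pyGetD (PySem.List.pyGetD grid r []) c 0 = 1 then 1 else 0
            else 0
          else 0)).sum
        = if (j - d.2) ∈ PySem.List.pyRange 0 C 1 then
            (if r = i - d.1 then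
              if (0 ≤ r + d.1 ∧ r + d.1 < R ∧ 0 ≤ j - d.2 + d.2 ∧ j - d.2 + d.2 < C) ∧
                  PySem.List.pyGetD (PySem.List.pyGetD grid r []) (j - d.2) 0 = 1 then 1 else 0
            else 0) else 0 :=
      fun r => pvSumCollapse _ (PySem.List.nodup_pyRange_one 0 C) _ _
    simp only [hc]
    by_cases hm : 0 ≤ j - d.2 ∧ j - d.2 < C
    · rw [List.map_congr_left (fun r _ => if_pos (PySem.List.mem_pyRange_one.mpr ⟨hm.1, hm.2⟩))]
      rw [pvSumCollapse _ (PySem.List.nodup_pyRange_one 0 R) _ _]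
      by_cases hr : 0 ≤ i - d.1 ∧ i - d.1 < R
      · rw [if_pos (PySem.List.mem_pyRange_one.mpr ⟨hr.1, hr.2⟩)]
        have harith : i - d.1 + d.1 = i ∧ j - d.2 + d.2 = j := by constructor <;> ring
        by_cases hpp : PySem.List.pyGetD (PySem.List.pyGetD grid (i - d.1) []) (j - d.2) 0 = 1
        · rw [if_pos ⟨⟨by omega, by omega, by omega, by omega⟩, hpp⟩,
              if_pos ⟨⟨hr.1, hr.2, hm.1, hm.2⟩, hpp⟩]
        · rw [if_neg (fun h => hpp h.2), if_neg (fun h => hpp h.2)]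
      · rw [if_neg (fun h => hr (PySem.List.mem_pyRange_one.mp h)),
            if_neg (fun h : _ ∧ _ => hr ⟨h.1.1, h.1.2.1⟩)]
    · rw [List.map_congr_left (fun r _ => if_neg (fun h => hm (PySem.List.mem_pyRange_one.mp h)))]
      rw [if_neg (fun h : _ ∧ _ => hm ⟨h.1.2.2.1, h.1.2.2.2⟩)]
      simp
  rw [List.map_congr_left step4]
  rw [nbCnt, pvCountP_eq_sum, ← List.sum_reverse, ← List.map_reverse]
  simp only [pvDeltas, pvDeltasB]
  norm_num
  simp only [show ∀ x : Int, x + -1 = x - 1 from fun x => by ring,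
    show ∀ x : Int, (0 ≤ x + 1) ↔ (-1 ≤ x) from fun x => by omega]

theorem isAcessibleGo_eq (grid : List (List Int)) (R C i j : Int) :
    ∀ (ds : List (Int × Int)) (n : Int), n ≤ 3 →
    isAcessibleGo grid R C i j ds n =
      decide (3 < n + (ds.countP (fun d =>
        decide (0 ≤ i + d.1 ∧ i + d.1 < R ∧ 0 ≤ j + d.2 ∧ j + d.2 < C) &&
        decide (PySem.List.pyGetD (PySem.List.pyGetD grid (i + d.1) []) (j + d.2) 0 = 1)) : Int)) := by
  intro ds
  induction ds with
  | nil => intro n hn; simp [isAcessibleGo]; omega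
  | cons d rest ih =>
    intro n hn
    obtain ⟨dr, dc⟩ := d
    simp only [isAcessibleGo, List.countP_cons]
    by_cases hb : 0 ≤ i + dr ∧ i + dr < R ∧ 0 ≤ j + dc ∧ j + dc < C
    · by_cases hp : PySem.List.pyGetD (PySem.List.pyGetD grid (i + dr) []) (j + dc) 0 = 1
      · by_cases h4 : n + 1 > 3
        · have hc : (0:Int) ≤ (rest.countP (fun d =>
              decide (0 ≤ i + d.1 ∧ i + d.1 < R ∧ 0 ≤ j + d.2 ∧ j + d.2 < C) &&
              decide (PySem.List.pyGetD (PySem.List.pyGetD grid (i + d.1) []) (j + d.2) 0 = 1)) : Int) :=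
            Int.natCast_nonneg _
          simp [hb, hp, h4]
          omega
        · simp [hb, hp, h4, ih (n + 1) (by omega)]
          omega
      · simp [hb, hp, if_neg (show ¬ n > 3 by omega), ih n hn]
    · simp [hb, ih n hn]

theorem is_acessible_eq (grid : List (List Int)) (i j : Int) :
    is_acessible grid i j =
      decide (3 < (nbCnt grid (grid.length) ((grid.headD []).length) i j : Int)) := by
  rw [is_acessible, isAcessibleGo_eq grid (grid.length) ((grid.headD []).length) i j pvDeltas 0 (by norm_num),
    nbCnt]
  norm_num

theorem counts_getD (grid : List (List Int)) (rows cols : Int) (t : Int × Int) :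
    ((pvTargets grid rows cols).foldl (fun d t => d.insert t (d.getD t 0 + 1))
      PySem.Dict.empty).getD t 0 = ((pvTargets grid rows cols).count t : Int) := by
  rw [PySem.Dict.foldl_insert_getD_add_one_eq_counter, PySem.Dict.getD_counter]

-- ===== VERDICT (by name: the statement is the Claim_ definition above) =====
theorem get_accessible_rolls_spec : Claim_equal_get_accessible_rolls := by
  intro grid _ _
  unfold Spec_get_accessible_rolls
  rw [get_accessible_rolls, get_accessible_rolls_alt]
  -- rewrite A's inner loop into filter/map form
  have hinner : ∀ (acc : List (Int × Int)) (r : Int),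
      List.foldl (fun acc c =>
        if PySem.List.pyGetD (PySem.List.pyGetD grid r []) c 0 = 1 then
          if ¬is_acessible grid r c = true then acc ++ [(r, c)] else acc
        else acc) acc (PySem.List.pyRange 0 ((grid.headD []).length : Int) 1)
      = acc ++ ((PySem.List.pyRange 0 ((grid.headD []).length : Int) 1).filter
          (fun c => decide (PySem.List.pyGetD (PySem.List.pyGetD grid r []) c 0 = 1) &&
            !is_acessible grid r c)).map (fun c => (r, c)) := by
    intro acc r
    rw [show (fun (acc : List (Int × Int)) (c : Int) =>
        if PySem.List.pyGetD (PySem.List.pyGetD grid r []) c 0 = 1 then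
          if ¬is_acessible grid r c = true then acc ++ [(r, c)] else acc
        else acc)
      = (fun (acc : List (Int × Int)) (c : Int) =>
        if (decide (PySem.List.pyGetD (PySem.List.pyGetD grid r []) c 0 = 1) &&
            !is_acessible grid r c) = true then acc ++ [(r, c)] else acc) from
      funext fun acc => funext fun c => by
        by_cases h1 : PySem.List.pyGetD (PySem.List.pyGetD grid r []) c 0 = 1 <;>
          by_cases h2 : is_acessible grid r c = true <;> simp [h1, h2]]
    exact PySem.List.foldl_append_if _ _ _ _
  simp only [hinner]
  rw [PySem.List.foldl_append_eq_flatMap]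
  rw [List.nil_append, List.flatMap_def, List.flatMap_def]
  congr 1
  apply List.map_congr_left
  intro r hr
  congr 1
  apply List.filter_congr
  intro c hc
  obtain ⟨hr0, hrR⟩ := PySem.List.mem_pyRange_one.mp hr
  obtain ⟨hc0, hcC⟩ := PySem.List.mem_pyRange_one.mp hc
  rw [is_acessible_eq, counts_getD,
    targets_count grid (grid.length : Int) ((grid.headD []).length : Int) r c hr0 hrR hc0 hcC]
  rw [Bool.eq_iff_iff]
  simp only [Bool.and_eq_true, beq_iff_eq, decide_eq_true_eq,
    Bool.not_eq_true', decide_eq_false_iff_not, not_lt]
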